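-- pv_equiv track=rewrite | github.com/mat4rte/Laboratorios-de-Algoritmia-II | Treino 1/isbn.py | isbn
-- ===== SOURCE A (Python) =====
-- def isbn(livros):
--
--     inv = []
--     for livro in livros:
--         sum = 0
--         for idx, num in enumerate(livros[livro]):
--
--             if idx == 0 or idx % 2 == 0:
--                 sum += int(num)*1
--             else:
--                 sum += int(num)*3
--
--         if sum % 10 != 0 :
--             inv.append(livro)
--
--     return inv
-- ===== SOURCE B (Python) =====
-- def isbn(livros):
--     def total(seq):
--         seq = list(seq)
--         if not seq:
--             return 0
--         if len(seq) == 1: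
--             return int(seq[0])
--         return int(seq[0]) + 3 * int(seq[1]) + total(seq[2:])
--     return [livro for livro, digitos in livros.items() if total(digitos) % 10 != 0]
-- ===== Notes on version B (the rewrite author's own statement) =====
-- stated objective: alternative
-- what changed: Replaces the indexed enumerate loop with an even/odd branch by a two-at-a-time recursion over the digit list (weights 1 and 3 per pair) and a comprehension over items(), removing both the index arithmetic and the key lookup livros[livro].
import Mathlib
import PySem

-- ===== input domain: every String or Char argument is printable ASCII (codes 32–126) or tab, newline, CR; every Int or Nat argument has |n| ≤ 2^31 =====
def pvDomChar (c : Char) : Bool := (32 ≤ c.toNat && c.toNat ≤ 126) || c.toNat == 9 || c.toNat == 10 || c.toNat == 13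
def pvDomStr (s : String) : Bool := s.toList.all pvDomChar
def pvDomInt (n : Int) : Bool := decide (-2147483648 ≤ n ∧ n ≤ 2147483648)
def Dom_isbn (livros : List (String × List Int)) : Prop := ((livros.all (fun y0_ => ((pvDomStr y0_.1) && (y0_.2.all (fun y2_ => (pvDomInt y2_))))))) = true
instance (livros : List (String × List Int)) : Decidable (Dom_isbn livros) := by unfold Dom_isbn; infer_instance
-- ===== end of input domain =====

-- B replaces the indexed enumerate loop with an even/odd branch by a two-at-a-time
-- recursion over the digit list and a comprehension over the items (alternative decomposition).


-- ===== PORT A =====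
-- for livro in livros: iterate the keys; livros[livro] is a dict lookup
def isbn (livros : List (String × List Int)) : List String :=
  livros.foldl
    (fun inv p =>
      let livro := p.1
      let s :=
        (PySem.List.enumerate ((PySem.Dict.mk livros).getD livro []) 0).foldl
          (fun sum iq =>
            if iq.1 == 0 || PySem.Int.mod iq.1 2 == 0 then sum + iq.2 * 1
            else sum + iq.2 * 3)
          0
      if PySem.Int.mod s 10 ≠ 0 then inv ++ [livro] else inv)
    []

-- ===== PORT B =====
-- two-at-a-time recursion: weight 1 for the first of each pair, 3 for the second
def isbnTotal : List Int → Int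
  | [] => 0
  | [a] => a
  | a :: b :: rest => a + 3 * b + isbnTotal rest

def isbn_alt (livros : List (String × List Int)) : List String :=
  (livros.filter (fun p => PySem.Int.mod (isbnTotal p.2) 10 ≠ 0)).map (·.1)

-- ===== PRECONDITION & SPEC =====
-- Pre_ excludes lists with duplicate keys: a Python dict cannot hold them, so the
-- assoc-list model's behaviour there is an artefact of the encoding, not of A.
def Pre_isbn (livros : List (String × List Int)) : Prop :=
  (livros.map Prod.fst).Nodup

instance (livros : List (String × List Int)) : Decidable (Pre_isbn livros) := by
  unfold Pre_isbn; infer_instance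

def pvWitness_isbn : (List (String × List Int)) := [("a", [1, 2, 3]), ("b", [1, 2])]

def Spec_isbn (livros : List (String × List Int)) (out : List String) : Prop := out = isbn_alt livros
instance (livros : List (String × List Int)) (out : List String) : Decidable (Spec_isbn livros out) := by unfold Spec_isbn; infer_instance

-- ===== CLAIM (what is proved, stated in full; the proofs are below) =====
def Claim_equal_isbn : Prop := ∀ (livros : List (String × List Int)), Dom_isbn livros → Pre_isbn livros → Spec_isbn livros (isbn livros)

-- ===== LEMMAS AND PROOFS =====

-- A's inner enumerate loop, started at an even nonnegative index, is B's paired recursion.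
theorem isbn_loopA_eq (xs : List Int) :
    ∀ (s acc : Int), 0 ≤ s → s % 2 = 0 →
      (PySem.List.enumerate xs s).foldl
        (fun sum iq =>
          if iq.1 == 0 || PySem.Int.mod iq.1 2 == 0 then sum + iq.2 * 1
          else sum + iq.2 * 3)
        acc = acc + isbnTotal xs := by
  have hm : ∀ a : Int, PySem.Int.mod a 2 = a % 2 :=
    fun a => PySem.Int.mod_eq_emod_of_pos (by norm_num)
  induction xs using isbnTotal.induct with
  | case1 => intro s acc _ _; simp [PySem.List.enumerate, isbnTotal]
  | case2 a =>
      intro s acc hs he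
      have c1 : (s == 0 || (PySem.Int.mod s 2 == 0)) = true := by
        simp [hm, he]
      simp only [PySem.List.enumerate_cons, PySem.List.enumerate_nil, List.foldl_cons,
        List.foldl_nil, c1, if_true, isbnTotal]
      ring
  | case3 a b rest ih =>
      intro s acc hs he
      have c1 : (s == 0 || (PySem.Int.mod s 2 == 0)) = true := by
        simp [hm, he]
      have c2 : ((s + 1) == 0 || (PySem.Int.mod (s + 1) 2 == 0)) = false := by
        simp [hm]; omega
      simp only [PySem.List.enumerate_cons, List.foldl_cons, c1, c2, if_true,
        Bool.false_eq_true, if_false]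
      rw [ih (s + 1 + 1) _ (by omega) (by omega)]
      simp only [isbnTotal]
      ring

-- A's outer append-on-condition loop is filter-then-map.
theorem isbn_foldl_sel (l : List (String × List Int)) (acc : List String) :
    l.foldl
      (fun inv p => if PySem.Int.mod (isbnTotal p.2) 10 ≠ 0 then inv ++ [p.1] else inv)
      acc
    = acc ++ (l.filter (fun p => PySem.Int.mod (isbnTotal p.2) 10 ≠ 0)).map (·.1) := by
  induction l generalizing acc with
  | nil => simp
  | cons p rest ih =>
      simp only [List.foldl_cons, List.filter_cons]
      by_cases h : PySem.Int.mod (isbnTotal p.2) 10 = 0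
      · rw [if_neg (fun hne => hne h), ih,
          show decide (PySem.Int.mod (isbnTotal p.2) 10 ≠ 0) = false from
            decide_eq_false (fun hne => hne h)]
        rw [if_neg (by simp)]
      · rw [if_pos h, ih, show decide (PySem.Int.mod (isbnTotal p.2) 10 ≠ 0) = true from
            decide_eq_true h]
        rw [if_pos rfl]
        simp

theorem isbn_spec_aux (livros : List (String × List Int)) (h : Pre_isbn livros) :
    isbn livros = isbn_alt livros := by
  unfold isbn isbn_alt
  rw [PySem.List.foldl_congr_mem
      (g := fun inv p =>
        if PySem.Int.mod (isbnTotal p.2) 10 ≠ 0 then inv ++ [p.1] else inv)]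
  · rw [isbn_foldl_sel]; simp
  · intro acc p hp
    have hget : (PySem.Dict.mk livros).getD p.1 [] = p.2 := by
      apply PySem.Dict.getD_of_mem_items
      · simpa [PySem.Dict.items] using hp
      · simpa [PySem.Dict.keys, PySem.Dict.items] using h
    simp only [hget]
    rw [isbn_loopA_eq p.2 0 0 le_rfl rfl]
    simp

-- ===== VERDICT (by name: the statement is the Claim_ definition above) =====
theorem isbn_spec : Claim_equal_isbn := by
  intro livros _ hpre
  exact isbn_spec_aux livros hpre
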